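-- pv_equiv track=rewrite | github.com/sarahtwilliams412-bit/th3cl4w | tests/test_vla_model.py | _make_object_ascii
-- ===== SOURCE A (Python) =====
-- def _make_object_ascii(width=120, height=40) -> str:
--     """Create ASCII art with a dense object region.
--
--     Puts a dense block of '#' characters in the center of the frame,
--     surrounded by spaces.
--     """
--     lines = []
--     for r in range(height):
--         row = []
--         for c in range(width):
--             # Dense block from (45,15) to (75,25)
--             if 45 <= c <= 75 and 15 <= r <= 25:
--                 row.append("#")
--             else:
--                 row.append(" ")
--         lines.append("".join(row))
--     return "\n".join(lines)
-- ===== SOURCE B (Python) =====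
-- def _make_object_ascii(width=120, height=40) -> str:
--     """Row-template version: precompute the blank and dense rows once,
--     then pick one per row index."""
--     if height <= 0:
--         return ""
--     blank_row = " " * width
--     dense_row = (" " * min(45, width)
--                  + "#" * (min(76, width) - 45)
--                  + " " * (width - 76))
--     return "\n".join(dense_row if 15 <= r <= 25 else blank_row
--                      for r in range(height))
-- ===== Notes on version B (the rewrite author's own statement) =====
-- stated objective: faster
-- what changed: Replaces the per-cell nested Python loop by two precomputed row templates (blank row and clamped dense row built with string repetition) selected once per row and joined.
import Mathlib
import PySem

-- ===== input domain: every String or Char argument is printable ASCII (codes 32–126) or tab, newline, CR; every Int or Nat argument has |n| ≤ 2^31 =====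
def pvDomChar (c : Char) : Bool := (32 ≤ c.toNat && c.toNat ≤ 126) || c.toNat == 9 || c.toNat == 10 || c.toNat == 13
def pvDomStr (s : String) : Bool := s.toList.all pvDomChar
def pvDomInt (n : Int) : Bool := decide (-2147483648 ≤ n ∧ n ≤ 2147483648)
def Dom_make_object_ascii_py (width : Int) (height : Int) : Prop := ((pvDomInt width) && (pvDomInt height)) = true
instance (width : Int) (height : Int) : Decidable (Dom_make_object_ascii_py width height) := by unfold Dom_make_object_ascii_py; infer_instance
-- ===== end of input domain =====

-- B replaces A's per-cell nested loop by two precomputed row templates selected per row; measurably faster (C-level string repetition/join instead of per-cell interpreted work).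

-- ===== PORT A =====
def make_object_ascii_py (width : Int) (height : Int) : String :=
  let lines := (PySem.List.pyRange 0 height 1).foldl (fun lines r =>
    let row := (PySem.List.pyRange 0 width 1).foldl (fun row c =>
      if (45 ≤ c ∧ c ≤ 75) ∧ (15 ≤ r ∧ r ≤ 25) then row ++ ["#"] else row ++ [" "])
      ([] : List String)
    lines ++ [PySem.Str.join "" row]) ([] : List String)
  PySem.Str.join "\n" lines

-- ===== PORT B =====
def make_object_ascii_py_alt (width : Int) (height : Int) : String :=
  if height ≤ 0 then "" else
  let blank_row := String.ofList (PySem.List.pyRepeat [' '] width)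
  let dense_row := String.ofList (PySem.List.pyRepeat [' '] (min 45 width)
      ++ PySem.List.pyRepeat ['#'] (min 76 width - 45)
      ++ PySem.List.pyRepeat [' '] (width - 76))
  PySem.Str.join "\n" ((PySem.List.pyRange 0 height 1).map
    (fun r => if 15 ≤ r ∧ r ≤ 25 then dense_row else blank_row))

-- ===== PRECONDITION & SPEC =====
def Spec_make_object_ascii_py (width : Int) (height : Int) (out : String) : Prop := out = make_object_ascii_py_alt width height
instance (width : Int) (height : Int) (out : String) : Decidable (Spec_make_object_ascii_py width height out) := by unfold Spec_make_object_ascii_py; infer_instance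

-- ===== CLAIM (what is proved, stated in full; the proofs are below) =====
def Claim_equal_make_object_ascii_py : Prop := ∀ (width : Int) (height : Int), Dom_make_object_ascii_py width height → Spec_make_object_ascii_py width height (make_object_ascii_py width height)

-- ===== LEMMAS AND PROOFS =====

-- the per-cell map over a row equals the clamped replicate template (Nat form)
lemma rowChars_eq (w : Nat) :
    (List.range w).map (fun (k : Nat) => if 45 ≤ k ∧ k ≤ 75 then '#' else ' ')
      = List.replicate (min 45 w) ' ' ++ List.replicate (min 76 w - 45) '#'
        ++ List.replicate (w - 76) ' ' := by
  induction w with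
  | zero => simp
  | succ n ih =>
      rw [List.range_succ, List.map_append, ih]
      by_cases h1 : n < 45
      · have : ¬ (45 ≤ n ∧ n ≤ 75) := by omega
        simp only [List.map_cons, List.map_nil, this, if_false]
        have e1 : min 45 (n+1) = min 45 n + 1 := by omega
        have e2 : min 76 (n+1) - 45 = 0 := by omega
        have e3 : min 76 n - 45 = 0 := by omega
        have e4 : (n+1) - 76 = 0 := by omega
        have e5 : n - 76 = 0 := by omega
        simp [e1, e2, e3, e4, e5, List.replicate_succ']
      · by_cases h2 : n < 76
        · have : (45 ≤ n ∧ n ≤ 75) := by omega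
          simp only [List.map_cons, List.map_nil, this]
          have e1 : min 45 (n+1) = min 45 n := by omega
          have e2 : min 76 (n+1) - 45 = (min 76 n - 45) + 1 := by omega
          have e4 : (n+1) - 76 = 0 := by omega
          have e5 : n - 76 = 0 := by omega
          simp [e1, e2, e4, e5, List.replicate_succ']
        · have : ¬ (45 ≤ n ∧ n ≤ 75) := by omega
          simp only [List.map_cons, List.map_nil, this, if_false]
          have e1 : min 45 (n+1) = min 45 n := by omega
          have e2 : min 76 (n+1) - 45 = min 76 n - 45 := by omega
          have e4 : (n+1) - 76 = (n - 76) + 1 := by omega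
          simp [e1, e2, e4, List.replicate_succ']


-- 'if p: out.append(a) else: out.append(b)' as a map (two-branch variant of foldl_append_singleton_eq_map)
lemma foldl_append_pair {α β : Type} (p : α → Prop) [DecidablePred p] (a b : β)
    (l : List α) (acc : List β) :
    l.foldl (fun acc x => if p x then acc ++ [a] else acc ++ [b]) acc
      = acc ++ l.map (fun x => if p x then a else b) := by
  induction l generalizing acc with
  | nil => simp
  | cons x xs ih => by_cases h : p x <;> simp [h, ih, List.append_assoc]

-- one row of A equals the selected template of B
lemma rowA_eq (width r : Int) :
    PySem.Str.join "" ((PySem.List.pyRange 0 width 1).map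
        (fun c => if (45 ≤ c ∧ c ≤ 75) ∧ (15 ≤ r ∧ r ≤ 25) then "#" else " "))
      = if 15 ≤ r ∧ r ≤ 25 then
          String.ofList (PySem.List.pyRepeat [' '] (min 45 width)
            ++ PySem.List.pyRepeat ['#'] (min 76 width - 45)
            ++ PySem.List.pyRepeat [' '] (width - 76))
        else String.ofList (PySem.List.pyRepeat [' '] width) := by
  apply String.toList_inj.mp
  rw [PySem.List.pyRange_one]
  simp only [sub_zero, zero_add]
  by_cases hr : 15 ≤ r ∧ r ≤ 25
  · simp only [hr, and_true, if_true, PySem.List.pyRepeat_singleton]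
    rw [PySem.Str.toList_join, List.map_map, List.map_map]
    have hfn : ((String.toList ∘ (fun c : Int => if 45 ≤ c ∧ c ≤ 75 then ("#" : String) else " ")) ∘ (fun k : Nat => (k : Int)))
        = ((fun c => [c]) ∘ (fun (k : Nat) => if 45 ≤ k ∧ k ≤ 75 then '#' else ' ')) := by
      funext k
      by_cases h : 45 ≤ k ∧ k ≤ 75
      · have h' : 45 ≤ (k : Int) ∧ (k : Int) ≤ 75 := by omega
        simp [h, h']
      · have h' : ¬ (45 ≤ (k : Int) ∧ (k : Int) ≤ 75) := by omega
        simp [h]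
    rw [hfn, ← List.map_map, show ("" : String).toList = [] from rfl,
      PySem.Chars.join_nil_singletons, rowChars_eq]
    have e1 : (min 45 width).toNat = min 45 width.toNat := by omega
    have e2 : (min 76 width - 45).toNat = min 76 width.toNat - 45 := by omega
    have e3 : (width - 76).toNat = width.toNat - 76 := by omega
    simp [e1, e2, e3]
  · simp only [hr, and_false, if_false, PySem.List.pyRepeat_singleton]
    rw [PySem.Str.toList_join, List.map_map, List.map_map]
    have hfn : ((String.toList ∘ (fun _ : Int => (" " : String))) ∘ (fun k : Nat => (k : Int)))
        = ((fun c => [c]) ∘ (fun (_ : Nat) => ' ')) := by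
      funext k; simp
    rw [hfn, ← List.map_map, show ("" : String).toList = [] from rfl,
      PySem.Chars.join_nil_singletons]
    simp [List.map_const']

-- ===== VERDICT (by name: the statement is the Claim_ definition above) =====
theorem make_object_ascii_py_spec : Claim_equal_make_object_ascii_py := by
  intro width height _
  unfold Spec_make_object_ascii_py make_object_ascii_py make_object_ascii_py_alt
  by_cases hh : height ≤ 0
  · have h0 : (height - 0).toNat = 0 := by omega
    simp only [hh, if_true, PySem.List.pyRange_one, h0, List.range_zero, List.map_nil]
    apply String.toList_inj.mp
    rw [PySem.Str.toList_join]
    simp [PySem.Chars.join_nil]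
  · simp only [hh, if_false]
    simp only [foldl_append_pair, PySem.List.foldl_append_singleton_eq_map, List.nil_append]
    congr 1
    apply List.map_congr_left
    intro r _
    exact rowA_eq width r
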